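-- pv_equiv track=rewrite | github.com/drnelson6/aps-diglib-migration-scripts | clean-diglib-batches.py | process_lang_abbr
-- ===== SOURCE A (Python) =====
-- def process_lang_abbr(cell):
--    new_cell = []
--    if cell != '':
--        cells = cell.split('|')
--        for i in cells:
--            new_data = f'({i})'
--            new_cell.append(new_data)
--    return '|'.join(new_cell)
-- ===== SOURCE B (Python) =====
-- def process_lang_abbr(cell):
--     if cell != '':
--         return '(' + cell.replace('|', ')|(') + ')'
--     return ''
-- ===== Notes on version B (the rewrite author's own statement) =====
-- stated objective: idiomatic
-- what changed: Replaces the split-into-list / per-field wrapping loop / join pipeline by a single delimiter substitution: wrap the whole string in parentheses and replace every '|' by ')|('.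
import Mathlib
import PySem

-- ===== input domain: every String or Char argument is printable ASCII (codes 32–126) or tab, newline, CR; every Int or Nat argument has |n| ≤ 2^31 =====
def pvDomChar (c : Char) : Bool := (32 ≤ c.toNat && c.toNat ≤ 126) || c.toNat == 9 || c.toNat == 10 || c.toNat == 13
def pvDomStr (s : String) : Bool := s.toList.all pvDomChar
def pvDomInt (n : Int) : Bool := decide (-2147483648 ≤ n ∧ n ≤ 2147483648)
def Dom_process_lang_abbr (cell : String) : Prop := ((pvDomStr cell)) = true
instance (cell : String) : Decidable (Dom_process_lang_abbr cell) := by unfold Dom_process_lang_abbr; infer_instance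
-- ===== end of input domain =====

-- B replaces A's split / per-field wrapping loop / join pipeline by a single
-- delimiter substitution ('(' + cell.replace('|', ')|(') + ')'): more idiomatic, same O(n) cost.

-- ===== PORT A =====
-- A: build new_cell = []; if cell non-empty, split on '|' and append '(i)' for each field; join with '|'.
def process_lang_abbr (cell : String) : String :=
  let new_cell : List String := []
  let new_cell :=
    if cell ≠ "" then
      -- cells = cell.split('|'); the separator is the non-empty literal "|", so split? is some
      let cells := (PySem.Str.split? cell "|").getD []
      cells.foldl (fun acc i => acc ++ ["(" ++ i ++ ")"]) new_cell
    else new_cell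
  PySem.Str.join "|" new_cell

-- ===== PORT B =====
def process_lang_abbr_alt (cell : String) : String :=
  if cell ≠ "" then "(" ++ PySem.Str.replace cell "|" ")|(" ++ ")" else ""

-- ===== PRECONDITION & SPEC =====
def Spec_process_lang_abbr (cell : String) (out : String) : Prop := out = process_lang_abbr_alt cell
instance (cell : String) (out : String) : Decidable (Spec_process_lang_abbr cell out) := by unfold Spec_process_lang_abbr; infer_instance

-- ===== CLAIM (what is proved, stated in full; the proofs are below) =====
def Claim_equal_process_lang_abbr : Prop := ∀ (cell : String), Dom_process_lang_abbr cell → Spec_process_lang_abbr cell (process_lang_abbr cell)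

-- ===== LEMMAS AND PROOFS =====

-- per-character substitution performed by B (for the single-char pattern '|')
def pvSub (c : Char) : List Char := if c = '|' then [')', '|', '('] else [c]

-- simple recursive characterisation of splitting on a single '|'
def pvSplit : List Char → List (List Char)
  | [] => [[]]
  | c :: t => if c = '|' then [] :: pvSplit t
              else match pvSplit t with
                   | [] => [[c]]          -- unreachable: pvSplit is never []
                   | p :: ps => (c :: p) :: ps

theorem pvSplit_ne_nil (l : List Char) : pvSplit l ≠ [] := by
  cases l with
  | nil => simp [pvSplit]
  | cons c t =>
    simp only [pvSplit]
    split_ifs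
    · simp
    · cases pvSplit t <;> simp

-- the fueled splitOn.go, with enough fuel, computes pvSplit (prefixed by acc/cur)
theorem go_split_eq (fuel : Nat) :
    ∀ (l cur : List Char) (accs : List (List Char)), l.length < fuel →
      PySem.Chars.splitOn.go ['|'] fuel l cur accs =
        accs.reverse ++ (match pvSplit l with
                         | [] => []
                         | p :: ps => (cur.reverse ++ p) :: ps) := by
  induction fuel with
  | zero => intro l cur accs h; omega
  | succ f ih =>
    intro l cur accs h
    cases l with
    | nil =>
      simp [PySem.Chars.splitOn.go, pvSplit]
    | cons c t =>
      by_cases hc : c = '|'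
      · subst hc
        have hpre : List.isPrefixOf ['|'] ('|' :: t) = true := by
          simp [List.isPrefixOf]
        rw [PySem.Chars.splitOn.go]
        simp only [hpre, if_true, List.length_cons, List.drop_succ_cons, List.length_nil, List.drop_zero]
        rw [ih t [] (cur.reverse :: accs) (by simp at h; omega)]
        have := pvSplit_ne_nil t
        cases hs : pvSplit t with
        | nil => exact absurd hs this
        | cons p ps => simp [pvSplit, hs]
      · have hpre : List.isPrefixOf ['|'] (c :: t) = false := by
          simp [List.isPrefixOf]
          intro hh; exact hc hh.symm
        rw [PySem.Chars.splitOn.go]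
        simp only [hpre, Bool.false_eq_true, if_false]
        rw [ih t (c :: cur) accs (by simp at h; omega)]
        have := pvSplit_ne_nil t
        cases hs : pvSplit t with
        | nil => exact absurd hs this
        | cons p ps => simp [pvSplit, hc, hs]

theorem splitOn_eq_pvSplit (l : List Char) :
    PySem.Chars.splitOn l ['|'] = pvSplit l := by
  unfold PySem.Chars.splitOn
  rw [go_split_eq (l.length + 1) l [] [] (by omega)]
  have := pvSplit_ne_nil l
  cases hs : pvSplit l with
  | nil => exact absurd hs this
  | cons p ps => simp

-- the fueled replace.go with a single-char pattern computes a flatMap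
theorem go_replace_eq (fuel : Nat) :
    ∀ (l acc : List Char), l.length ≤ fuel →
      PySem.Chars.replace.go ['|'] [')', '|', '('] fuel l acc =
        acc.reverse ++ l.flatMap pvSub := by
  induction fuel with
  | zero =>
    intro l acc h
    have : l = [] := List.eq_nil_of_length_eq_zero (Nat.le_zero.mp h)
    subst this
    simp [PySem.Chars.replace.go]
  | succ f ih =>
    intro l acc h
    cases l with
    | nil => simp [PySem.Chars.replace.go]
    | cons c t =>
      by_cases hc : c = '|'
      · subst hc
        have hpre : List.isPrefixOf ['|'] ('|' :: t) = true := by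
          simp [List.isPrefixOf]
        rw [PySem.Chars.replace.go]
        simp only [hpre, if_true, List.length_cons, List.drop_succ_cons, List.length_nil, List.drop_zero]
        rw [ih t _ (by simp at h; omega)]
        simp [pvSub]
      · have hpre : List.isPrefixOf ['|'] (c :: t) = false := by
          simp [List.isPrefixOf]
          intro hh; exact hc hh.symm
        rw [PySem.Chars.replace.go]
        simp only [hpre, Bool.false_eq_true, if_false]
        rw [ih t _ (by simp at h; omega)]
        simp [pvSub, hc]

theorem replace_eq_flatMap (l : List Char) :
    PySem.Chars.replace l ['|'] [')', '|', '('] = l.flatMap pvSub := by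
  unfold PySem.Chars.replace
  simp only [List.isEmpty_cons, if_false, Bool.false_eq_true]
  exact go_replace_eq l.length l [] (le_refl _)

-- wrapping a field in parentheses
def pvWrap (p : List Char) : List Char := '(' :: p ++ [')']

-- joining: Chars.join on a head/tail split
theorem join_single (a : List Char) : PySem.Chars.join ['|'] [a] = a := by
  simp [PySem.Chars.join, List.intercalate, List.intersperse]

theorem join_cons2 (a b : List Char) (rest : List (List Char)) :
    PySem.Chars.join ['|'] (a :: b :: rest) = a ++ '|' :: PySem.Chars.join ['|'] (b :: rest) := by
  simp [PySem.Chars.join, List.intercalate, List.intersperse]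

-- joining the wrapped fields with '|' = wrap the whole substituted string
theorem join_pvSplit (l : List Char) :
    PySem.Chars.join ['|'] ((pvSplit l).map pvWrap) =
      '(' :: l.flatMap pvSub ++ [')'] := by
  induction l with
  | nil => rw [pvSplit, List.map_cons, List.map_nil, join_single]; simp [pvWrap]
  | cons c t ih =>
    have hne := pvSplit_ne_nil t
    by_cases hc : c = '|'
    · subst hc
      cases hs : pvSplit t with
      | nil => exact absurd hs hne
      | cons p ps =>
        rw [hs] at ih
        simp only [pvSplit, if_true, hs, List.map_cons] at ih ⊢
        rw [join_cons2, ih]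
        simp [pvWrap, pvSub]
    · cases hs : pvSplit t with
      | nil => exact absurd hs hne
      | cons p ps =>
        rw [hs] at ih
        simp only [pvSplit, hc, if_false, hs, List.map_cons] at ih ⊢
        cases ps with
        | nil =>
          simp only [List.map_nil] at ih ⊢
          rw [join_single] at ih ⊢
          have hp : p = t.flatMap pvSub := by
            simpa [pvWrap] using ih
          simp [pvWrap, hp, pvSub, hc]
        | cons q qs =>
          simp only [List.map_cons] at ih ⊢
          rw [join_cons2] at ih ⊢
          have hE : p ++ [')'] ++ '|' :: PySem.Chars.join ['|'] (pvWrap q :: List.map pvWrap qs)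
              = t.flatMap pvSub ++ [')'] := by
            have h1 := ih
            simp only [pvWrap, List.cons_append, List.append_assoc, List.cons.injEq, true_and] at h1
            simpa [List.append_assoc] using h1
          simp only [pvWrap, List.cons_append, List.append_assoc] at hE ⊢
          rw [hE]
          simp [pvSub, hc]

-- A's append loop builds the map of the wrapper over the fields
theorem foldl_append_map (xs : List String) (acc : List String) :
    xs.foldl (fun acc i => acc ++ ["(" ++ i ++ ")"]) acc
      = acc ++ xs.map (fun i => "(" ++ i ++ ")") := by
  induction xs generalizing acc with
  | nil => simp
  | cons x t ih => simp [ih, List.append_assoc]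

-- ===== VERDICT (by name: the statement is the Claim_ definition above) =====
theorem process_lang_abbr_spec : Claim_equal_process_lang_abbr := by
  intro cell _
  unfold Spec_process_lang_abbr process_lang_abbr process_lang_abbr_alt
  by_cases h : cell = ""
  · subst h
    simp only [ne_eq, not_true_eq_false, if_false]
    decide
  · simp only [ne_eq, h, not_false_eq_true, if_true]
    have hbar : ("|" : String).toList = ['|'] := by decide
    have hnew : (")|(" : String).toList = [')', '|', '('] := by decide
    obtain ⟨xs, hq, hxs⟩ :
        ∃ xs, PySem.Str.split? cell "|" = some xs ∧
          xs.map String.toList = PySem.Chars.splitOn cell.toList ['|'] := by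
      have hb := PySem.Str.split?_map cell "|"
      rw [hbar] at hb
      have hc : PySem.Chars.split? cell.toList ['|'] =
          some (PySem.Chars.splitOn cell.toList ['|']) := by
        simp [PySem.Chars.split?]
      rw [hc] at hb
      cases hq : PySem.Str.split? cell "|" with
      | none => rw [hq] at hb; simp at hb
      | some xs =>
        rw [hq] at hb
        simp only [Option.map_some, Option.some.injEq] at hb
        exact ⟨xs, rfl, hb⟩
    rw [hq]
    simp only [Option.getD_some]
    rw [foldl_append_map, List.nil_append]
    apply String.toList_inj.mp
    rw [PySem.Str.toList_join, hbar]
    have hmap : (xs.map (fun i => "(" ++ i ++ ")")).map String.toList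
        = (PySem.Chars.splitOn cell.toList ['|']).map pvWrap := by
      rw [List.map_map, ← hxs, List.map_map]
      apply List.map_congr_left
      intro p _
      show ("(" ++ p ++ ")").toList = pvWrap p.toList
      simp [String.toList_append, pvWrap]
    rw [hmap, splitOn_eq_pvSplit, join_pvSplit]
    rw [String.toList_append, String.toList_append, PySem.Str.toList_replace, hbar, hnew,
      replace_eq_flatMap]
    simp
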